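-- pv_equiv track=rewrite | github.com/xaviomvi/omvi-pipes-ai | backend/python/app/modules/parsers/google_files/google_sheets_parser.py | denormalize_sheet
-- ===== SOURCE A (Python) =====
-- from typing import Any, Dict, List, Optional
--
-- def denormalize_sheet(values: List[List[str]]) -> List[List[str]]:
--     """Fill merged/empty cells by propagating values down and right."""
--     if not values:
--         return values
--
--     max_cols = max(len(row) for row in values)
--
--     # Normalize row lengths
--     for row in values:
--         while len(row) < max_cols:
--             row.append("")
--
--     # Fill right (across columns) - useful if headings span across columns
--     for row in values:
--         last_val = ""
--         for col_idx in range(len(row)):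
--             if row[col_idx]:
--                 last_val = row[col_idx]
--             elif last_val:
--                 row[col_idx] = last_val
--
--     # Fill down (across rows) - useful for section headers like 'IG FEED'
--     for col_idx in range(max_cols):
--         last_val = ""
--         for row_idx in range(len(values)):
--             if values[row_idx][col_idx]:
--                 last_val = values[row_idx][col_idx]
--             elif last_val:
--                 values[row_idx][col_idx] = last_val
--
--     return values
-- ===== SOURCE B (Python) =====
-- from typing import List
--
--
-- def denormalize_sheet(values: List[List[str]]) -> List[List[str]]:
--     """Fill merged/empty cells by propagating values down and right.
--
--     Single fused row-major pass: each row is right-filled with a scalar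
--     carry and down-filled against the previous output row (which is
--     exactly the running column carry).  Replaces each row of `values`
--     with the new row (A instead pads/edits the row lists in place).
--     """
--     if not values:
--         return values
--     n = max(len(row) for row in values)
--     prev = [""] * n
--     for i, row in enumerate(values):
--         row = row + [""] * (n - len(row))
--         last = ""
--         out = []
--         for v, d in zip(row, prev):
--             if v:
--                 last = v
--             elif last:
--                 v = last
--             out.append(v if v else d)
--         values[i] = out
--         prev = out
--     return values
-- ===== Notes on version B (the rewrite author's own statement) =====
-- stated objective: alternative
-- what changed: Replaces A's three separate passes (pad all rows, right-fill each row, then a per-column down-fill pass over the whole grid) by one fused row-major pass in which each row is right-filled with a scalar carry and down-filled against the previous output row, which is exactly the running column-carry vector.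
import Mathlib
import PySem

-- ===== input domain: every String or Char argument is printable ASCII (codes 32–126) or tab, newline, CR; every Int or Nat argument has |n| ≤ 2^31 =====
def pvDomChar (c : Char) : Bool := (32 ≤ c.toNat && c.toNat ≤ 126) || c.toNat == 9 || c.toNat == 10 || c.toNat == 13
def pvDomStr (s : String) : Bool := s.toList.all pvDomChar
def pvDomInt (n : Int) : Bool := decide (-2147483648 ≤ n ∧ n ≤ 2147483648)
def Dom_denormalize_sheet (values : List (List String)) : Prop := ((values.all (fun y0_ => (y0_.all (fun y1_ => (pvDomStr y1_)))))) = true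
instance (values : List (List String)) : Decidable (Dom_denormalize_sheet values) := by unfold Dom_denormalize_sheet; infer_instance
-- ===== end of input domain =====

-- B replaces A's three separate passes (pad, right-fill, per-column down-fill) by one fused
-- row-major pass propagating the previous output row; equivalence is about the RETURN value
-- (A pads/edits the row lists in place, B replaces each row of the outer list).

-- ===== PORT A =====
-- `while len(row) < max_cols: row.append("")`
def pvPadA (n : Nat) (row : List String) : List String :=
  if row.length < n then pvPadA n (row ++ [""]) else row
termination_by n - row.length
decreasing_by simp; omega

-- the right-fill loop over one row (carry = last_val)
def pvFillRight : String → List String → List String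
  | _, [] => []
  | last, v :: vs =>
    if v ≠ "" then v :: pvFillRight v vs
    else if last ≠ "" then last :: pvFillRight last vs
    else v :: pvFillRight last vs

-- the down-fill loop for one column index c (carry = last_val); after normalization
-- every index c < row length, so `values[row_idx][col_idx]` is exactly `r.getD c ""`
def pvFillDown (c : Nat) : String → List (List String) → List (List String)
  | _, [] => []
  | last, r :: rs =>
    if r.getD c "" ≠ "" then r :: pvFillDown c (r.getD c "") rs
    else if last ≠ "" then r.set c last :: pvFillDown c last rs
    else r :: pvFillDown c last rs

def denormalize_sheet (values : List (List String)) : List (List String) :=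
  if values = [] then values
  else
    let n := values.foldl (fun m r => max m r.length) 0
    let g1 := values.map (pvPadA n)
    let g2 := g1.map (pvFillRight "")
    (List.range n).foldl (fun g c => pvFillDown c "" g) g2

-- ===== PORT B =====
-- `row + [""] * (n - len(row))`
def pvPadB (n : Nat) (row : List String) : List String :=
  row ++ List.replicate (n - row.length) ""

-- the fused inner loop: `for v, d in zip(row, prev)` with right-fill carry `last`
def pvRowB : List String → List String → String → List String
  | v :: vs, d :: ds, last =>
    if v ≠ "" then v :: pvRowB vs ds v
    else if last ≠ "" then last :: pvRowB vs ds last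
    else d :: pvRowB vs ds last
  | _, _, _ => []

-- the outer loop: prev is the previous output row
def pvLoopB (n : Nat) : List (List String) → List String → List (List String)
  | [], _ => []
  | r :: rs, prev =>
    let out := pvRowB (pvPadB n r) prev ""
    out :: pvLoopB n rs out

def denormalize_sheet_alt (values : List (List String)) : List (List String) :=
  if values = [] then values
  else
    let n := values.foldl (fun m r => max m r.length) 0
    pvLoopB n values (List.replicate n "")

-- ===== PRECONDITION & SPEC =====
def Spec_denormalize_sheet (values : List (List String)) (out : List (List String)) : Prop := out = denormalize_sheet_alt values
instance (values : List (List String)) (out : List (List String)) : Decidable (Spec_denormalize_sheet values out) := by unfold Spec_denormalize_sheet; infer_instance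

-- ===== CLAIM (what is proved, stated in full; the proofs are below) =====
def Claim_equal_denormalize_sheet : Prop := ∀ (values : List (List String)), Dom_denormalize_sheet values → Spec_denormalize_sheet values (denormalize_sheet values)

-- ===== LEMMAS AND PROOFS =====

-- the common pointwise merge: take the cell if nonempty, else the carry
def pvMerge (v d : String) : String := if v ≠ "" then v else d

-- reference down-fill: one pass over the rows, the new carry vector IS the output row
def pvDownAll : List (List String) → List String → List (List String)
  | [], _ => []
  | r :: rs, ds =>
    let out := List.zipWith pvMerge r ds
    out :: pvDownAll rs out

theorem pvPadA_eq (n : Nat) (row : List String) :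
    pvPadA n row = row ++ List.replicate (n - row.length) "" := by
  fun_induction pvPadA n row with
  | case1 row h ih =>
    rw [ih]
    simp only [List.append_assoc, List.cons_append, List.nil_append, List.length_append,
      List.length_singleton]
    congr 1
    have hrep : n - row.length = (n - (row.length + 1)) + 1 := by omega
    rw [hrep, List.replicate_succ]
  | case2 row h => simp; omega

theorem pvFillRight_length (last : String) (vs : List String) :
    (pvFillRight last vs).length = vs.length := by
  induction vs generalizing last with
  | nil => simp [pvFillRight]
  | cons v vs ih => simp only [pvFillRight]; split_ifs <;> simp [ih]

theorem pvRowB_eq (vs : List String) (ds : List String) (last : String) :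
    pvRowB vs ds last = List.zipWith pvMerge (pvFillRight last vs) ds := by
  induction vs generalizing ds last with
  | nil => cases ds <;> simp [pvRowB, pvFillRight]
  | cons v vs ih =>
    cases ds with
    | nil => simp only [pvFillRight, pvRowB]; split_ifs <;> simp
    | cons d ds =>
      simp only [pvFillRight, pvRowB]
      split_ifs <;> simp_all [List.zipWith, pvMerge]

theorem pvLoopB_eq (n : Nat) (rs : List (List String)) (prev : List String) :
    pvLoopB n rs prev = pvDownAll (rs.map (fun r => pvFillRight "" (pvPadB n r))) prev := by
  induction rs generalizing prev with
  | nil => simp [pvLoopB, pvDownAll]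
  | cons r rs ih => simp only [pvLoopB, pvDownAll, List.map_cons, pvRowB_eq, ih]

-- head/tail step of one column pass
theorem pvFillDown_cons (c : Nat) (last : String) (r : List String) (rs : List (List String)) :
    pvFillDown c last (r :: rs)
      = (if r.getD c "" ≠ "" then r else if last ≠ "" then r.set c last else r)
        :: pvFillDown c (if r.getD c "" ≠ "" then r.getD c "" else last) rs := by
  simp only [pvFillDown]; split_ifs <;> rfl

-- interchange: running the column passes over (r :: rs) = head processed per column, then
-- the column passes over rs with the updated carries
theorem pvFillDown_split (f : Nat → String) (cs : List Nat) (h : cs.Nodup) :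
    ∀ (r : List String) (rs : List (List String)),
    cs.foldl (fun g c => pvFillDown c (f c) g) (r :: rs)
      = cs.foldl (fun row c => if row.getD c "" ≠ "" then row else if f c ≠ "" then row.set c (f c) else row) r
        :: cs.foldl (fun g c => pvFillDown c (if r.getD c "" ≠ "" then r.getD c "" else f c) g) rs := by
  induction cs with
  | nil => intro r rs; simp
  | cons c0 cs ih =>
    intro r rs
    have hnd := List.nodup_cons.mp h
    simp only [List.foldl_cons, pvFillDown_cons]
    have hstep : (if r.getD c0 "" ≠ "" then r else if f c0 ≠ "" then r.set c0 (f c0) else r)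
        = (fun row c => if row.getD c "" ≠ "" then row else if f c ≠ "" then row.set c (f c) else row) r c0 := rfl
    rw [ih hnd.2]
    congr 1
    apply PySem.List.foldl_congr_mem'
    · intro c hc g
      congr 1
      have hne : c0 ≠ c := fun he => hnd.1 (he ▸ hc)
      have : (if r.getD c0 "" ≠ "" then r else if f c0 ≠ "" then r.set c0 (f c0) else r).getD c ""
          = r.getD c "" := by
        split_ifs <;> simp [List.getD, List.getElem?_set_ne hne]
      rw [this]

-- pointwise value of the per-row column fold
theorem pvHfold_getElem? (f : Nat → String) (cs : List Nat) (h : cs.Nodup) :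
    ∀ (r : List String) (j : Nat),
    (cs.foldl (fun row c => if row.getD c "" ≠ "" then row else if f c ≠ "" then row.set c (f c) else row) r)[j]?
      = if j ∈ cs then r[j]?.map (fun v => if v ≠ "" then v else f j) else r[j]? := by
  induction cs with
  | nil => intro r j; simp
  | cons c0 cs ih =>
    intro r j
    have hnd := List.nodup_cons.mp h
    simp only [List.foldl_cons]
    rw [ih hnd.2]
    by_cases hj : j = c0
    · subst hj
      have hjn : j ∉ cs := hnd.1
      simp only [if_neg hjn, List.mem_cons, true_or, if_true]
      cases hget : r[j]? with
      | none =>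
        have hlen : r.length ≤ j := List.getElem?_eq_none_iff.mp hget
        have hgd : r.getD j "" = "" := by simp [hget]
        have hset : r.set j (f j) = r := List.set_eq_of_length_le hlen
        simp only [hgd, ne_eq, not_true_eq_false, if_false]
        simp [hset, hget]
      | some v =>
        have hjl : j < r.length := (List.getElem?_eq_some_iff.mp hget).1
        have hgd : r.getD j "" = v := by simp [hget]
        by_cases hv : v = ""
        · subst hv
          have hje : r[j] = "" := (List.getElem?_eq_some_iff.mp hget).2
          simp only [hgd, ne_eq, not_true_eq_false, if_false]
          by_cases hf : f j = ""
          · simp [hf, hget]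
          · simp [hjl, hf]
        · simp [hv, hget]
    · have hne : c0 ≠ j := fun he => hj he.symm
      have hstep : (if r.getD c0 "" ≠ "" then r else if f c0 ≠ "" then r.set c0 (f c0) else r)[j]? = r[j]? := by
        split_ifs <;> simp [List.getElem?_set_ne hne]
      rw [hstep]
      simp [List.mem_cons, hj]

-- the per-row column fold equals the zipWith merge, for rows/carries of length n
theorem pvHfold_eq_zipWith (n : Nat) (r ds : List String) (hr : r.length = n) (hd : ds.length = n) :
    (List.range n).foldl (fun row c => if row.getD c "" ≠ "" then row else if (ds.getD c "") ≠ "" then row.set c (ds.getD c "") else row) r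
      = List.zipWith pvMerge r ds := by
  apply List.ext_getElem?
  intro j
  rw [pvHfold_getElem? (fun c => ds.getD c "") (List.range n) (List.nodup_range)]
  by_cases hj : j < n
  · have hjr : j < r.length := by omega
    have hjd : j < ds.length := by omega
    simp only [List.mem_range, hj, if_true]
    simp [List.getElem?_zipWith, List.getElem?_eq_getElem hjr, List.getElem?_eq_getElem hjd,
      pvMerge]
  · simp only [List.mem_range, hj, if_false]
    rw [List.getElem?_eq_none (by omega), List.getElem?_eq_none (by simp [List.length_zipWith]; omega)]

-- carries after one row = the output row itself
theorem pvCarry_eq (n : Nat) (r ds : List String) (hr : r.length = n) (hd : ds.length = n)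
    (c : Nat) (hc : c < n) :
    (if r.getD c "" ≠ "" then r.getD c "" else ds.getD c "")
      = (List.zipWith pvMerge r ds).getD c "" := by
  have hjr : c < r.length := by omega
  have hjd : c < ds.length := by omega
  simp [List.getElem?_zipWith, List.getElem?_eq_getElem hjr,
    List.getElem?_eq_getElem hjd, pvMerge]

-- the crux: the column-major down-fill equals the row-major pass with carry vector ds
theorem pvMain (n : Nat) (rs : List (List String)) (hlen : ∀ r ∈ rs, r.length = n) :
    ∀ ds : List String, ds.length = n →
    (List.range n).foldl (fun g c => pvFillDown c (ds.getD c "") g) rs = pvDownAll rs ds := by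
  induction rs with
  | nil =>
    intro ds _
    have h0 : ∀ cs : List Nat, cs.foldl (fun g c => pvFillDown c (ds.getD c "") g) ([] : List (List String)) = [] := by
      intro cs; induction cs with
      | nil => rfl
      | cons c cs ih => simpa [pvFillDown] using ih
    show List.foldl (fun g c => pvFillDown c (ds.getD c "") g) [] (List.range n) = []
    exact h0 (List.range n)
  | cons r rs ih =>
    intro ds hd
    have hr : r.length = n := hlen r (by simp)
    rw [pvFillDown_split (fun c => ds.getD c "") (List.range n) List.nodup_range r rs]
    simp only [pvDownAll]
    congr 1
    · exact pvHfold_eq_zipWith n r ds hr hd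
    · have hcong : (List.range n).foldl (fun g c => pvFillDown c (if r.getD c "" ≠ "" then r.getD c "" else ds.getD c "") g) rs
          = (List.range n).foldl (fun g c => pvFillDown c ((List.zipWith pvMerge r ds).getD c "") g) rs := by
        apply PySem.List.foldl_congr_mem'
        intro c hc g
        rw [pvCarry_eq n r ds hr hd c (List.mem_range.mp hc)]
      rw [hcong]
      exact ih (fun x hx => hlen x (by simp [hx])) _ (by simp [List.length_zipWith]; omega)

-- every row length is bounded by the foldl max
theorem pvFoldMax_init_le (xs : List (List String)) : ∀ init : Nat,
    init ≤ xs.foldl (fun m row => max m row.length) init := by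
  induction xs with
  | nil => intro init; simp
  | cons y ys ih =>
    intro init
    simp only [List.foldl_cons]
    exact le_trans (le_max_left init y.length) (ih _)

theorem pvLen_le_max (r : List String) : ∀ (values : List (List String)), r ∈ values →
    ∀ init : Nat, r.length ≤ values.foldl (fun m row => max m row.length) init := by
  intro values
  induction values with
  | nil => intro h; cases h
  | cons x xs ih =>
    intro hr init
    simp only [List.foldl_cons]
    rcases List.mem_cons.mp hr with h | h
    · subst h
      exact le_trans (le_max_right init r.length) (pvFoldMax_init_le xs _)
    · exact ih h _

-- ===== VERDICT (by name: the statement is the Claim_ definition above) =====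
theorem denormalize_sheet_spec : Claim_equal_denormalize_sheet := by
  intro values _
  unfold Spec_denormalize_sheet denormalize_sheet denormalize_sheet_alt
  by_cases hv : values = []
  · simp [hv]
  · simp only [if_neg hv]
    set n := values.foldl (fun m r => max m r.length) 0 with hn
    have hpad : values.map (pvPadA n) = values.map (pvPadB n) := by
      apply List.map_congr_left
      intro r _
      rw [pvPadA_eq]; rfl
    have hlen : ∀ g ∈ (values.map (pvPadA n)).map (pvFillRight ""), g.length = n := by
      intro g hg
      rcases List.mem_map.mp hg with ⟨p, hp, hpe⟩
      rcases List.mem_map.mp hp with ⟨r, hrm, hre⟩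
      have := pvLen_le_max r values hrm 0
      subst hpe hre
      rw [pvFillRight_length, pvPadA_eq]
      simp; omega
    have hcong0 : (List.range n).foldl (fun g c => pvFillDown c "" g) ((values.map (pvPadA n)).map (pvFillRight ""))
        = (List.range n).foldl (fun g c => pvFillDown c ((List.replicate n "").getD c "") g) ((values.map (pvPadA n)).map (pvFillRight "")) := by
      apply PySem.List.foldl_congr_mem'
      intro c _ g
      congr 1
      simp [List.getElem?_replicate]
      split_ifs <;> rfl
    rw [hcong0, pvMain n _ hlen (List.replicate n "") (by simp),
      pvLoopB_eq n values (List.replicate n ""), hpad]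
    simp [Function.comp_def]
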